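-- pv_equiv track=rewrite | github.com/wnsdlf925/algo | python-study/34.py | solution
-- ===== SOURCE A (Python) =====
-- def solution(nums):
--
--     answer = 0
--     phone = set()
--
--     for i in nums:
--         phone.add(i)
--
--     if len(phone) < len(nums)//2:
--         answer = len(phone)
--     else: answer = len(nums)//2
--
--     return answer
-- ===== SOURCE B (Python) =====
-- def solution(nums):
--     s = sorted(nums)
--     if s:
--         distinct = 1 + sum(1 for a, b in zip(s, s[1:]) if a != b)
--     else:
--         distinct = 0
--     return min(distinct, len(nums) // 2)
-- ===== Notes on version B (the rewrite author's own statement) =====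
-- stated objective: alternative
-- what changed: Counts distinct values by sorting a copy and counting adjacent unequal pairs in one scan, instead of building a hash set; the cap at len(nums)//2 becomes a single min().
import Mathlib
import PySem

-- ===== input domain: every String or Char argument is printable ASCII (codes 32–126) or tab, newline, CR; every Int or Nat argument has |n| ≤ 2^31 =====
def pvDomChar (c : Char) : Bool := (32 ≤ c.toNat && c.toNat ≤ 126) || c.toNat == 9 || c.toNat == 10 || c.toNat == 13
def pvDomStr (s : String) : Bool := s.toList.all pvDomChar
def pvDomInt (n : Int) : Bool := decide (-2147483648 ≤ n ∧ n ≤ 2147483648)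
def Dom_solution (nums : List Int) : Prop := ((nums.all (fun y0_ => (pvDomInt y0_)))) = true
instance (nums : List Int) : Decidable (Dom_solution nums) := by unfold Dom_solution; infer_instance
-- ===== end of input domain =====

-- B counts distinct values by sorting a copy and scanning adjacent pairs instead of building a set; same result.

-- ===== PORT A =====
def solution (nums : List Int) : Int :=
  let phone : PySem.Set Int := nums.foldl PySem.Set.add PySem.Set.empty
  if (PySem.Set.len phone : Int) < PySem.Int.floordiv (nums.length : Int) 2 then
    (PySem.Set.len phone : Int)
  else
    PySem.Int.floordiv (nums.length : Int) 2

-- ===== PORT B =====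
def solution_alt (nums : List Int) : Int :=
  let s := PySem.List.sorted nums (fun x => x) false
  let distinct : Int :=
    if s = [] then 0
    else 1 + ((s.zip (PySem.List.slice s (some (1 : Int)) none)).countP (fun p => p.1 ≠ p.2) : Int)
  min distinct (PySem.Int.floordiv (nums.length : Int) 2)

-- ===== PRECONDITION & SPEC =====
def Spec_solution (nums : List Int) (out : Int) : Prop := out = solution_alt nums
instance (nums : List Int) (out : Int) : Decidable (Spec_solution nums out) := by unfold Spec_solution; infer_instance

-- ===== CLAIM (what is proved, stated in full; the proofs are below) =====
def Claim_equal_solution : Prop := ∀ (nums : List Int), Dom_solution nums → Spec_solution nums (solution nums)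

-- ===== LEMMAS AND PROOFS =====

-- On a ≤-sorted list, 1 + (number of adjacent unequal pairs) is the number of distinct elements.
theorem adj_count_sorted (s : List Int) (hs : s.Pairwise (· ≤ ·)) :
    (if s = [] then (0 : Int)
     else 1 + ((s.zip s.tail).countP (fun p => p.1 ≠ p.2) : Int)) = (s.toFinset.card : Int) := by
  induction s with
  | nil => simp
  | cons a t ih =>
    cases t with
    | nil => simp
    | cons b u =>
      have hab : a ≤ b := (List.pairwise_cons.mp hs).1 b (by simp)
      have hbu : (b :: u).Pairwise (· ≤ ·) := (List.pairwise_cons.mp hs).2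
      have ih' := ih hbu
      simp only [List.zip_cons_cons, List.tail_cons, List.countP_cons, if_neg (by simp : ¬ (b :: u) = [])] at ih' ⊢
      by_cases hab' : a = b
      · subst hab'
        simp only [List.toFinset_cons, Finset.insert_idem, ne_eq, not_true_eq_false,
          decide_false] at *
        push_cast at *
        omega
      · have hanot : a ∉ (b :: u).toFinset := by
          simp only [List.mem_toFinset, List.mem_cons]
          rintro (h | h)
          · exact hab' h
          · have : b ≤ a := (List.pairwise_cons.mp hbu).1 a h
            exact hab' (le_antisymm hab this)
        simp only [List.toFinset_cons] at *
        rw [Finset.card_insert_of_notMem (by simpa using hanot)]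
        simp only [ne_eq, hab', not_false_eq_true, decide_true] at *
        push_cast at *
        omega

-- The length of set(xs) is the Finset cardinality of xs's elements.
theorem setLen_eq_card (xs : List Int) :
    (PySem.Set.ofList xs).length = xs.toFinset.card := by
  have hnd : (PySem.Set.ofList xs).Nodup := PySem.Set.nodup_ofList xs
  have hperm : (PySem.Set.ofList xs).Perm xs.dedup := by
    rw [List.perm_ext_iff_of_nodup hnd xs.nodup_dedup]
    intro a
    simp [PySem.Set.mem_ofList, List.mem_dedup]
  rw [List.card_toFinset]
  exact hperm.length_eq

-- ===== VERDICT (by name: the statement is the Claim_ definition above) =====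
theorem solution_spec : Claim_equal_solution := by
  intro nums _
  unfold Spec_solution solution solution_alt
  have hperm : (PySem.List.sorted nums (fun x => x) false).Perm nums :=
    PySem.List.sorted_perm nums (fun x => x) false
  have hpw : (PySem.List.sorted nums (fun x => x) false).Pairwise (· ≤ ·) :=
    PySem.List.sorted_pairwise nums (fun x => x)
  have htail : PySem.List.slice (PySem.List.sorted nums (fun x => x) false) (some (1 : Int)) none
      = (PySem.List.sorted nums (fun x => x) false).tail := by
    have := PySem.List.slice_from_natCast (PySem.List.sorted nums (fun x => x) false) 1
    simpa [List.drop_one] using this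
  have hadj := adj_count_sorted _ hpw
  have hA : (nums.foldl PySem.Set.add PySem.Set.empty).length = nums.toFinset.card :=
    setLen_eq_card nums
  have hfin : (PySem.List.sorted nums (fun x => x) false).toFinset = nums.toFinset :=
    List.toFinset_eq_of_perm _ _ hperm
  simp only [htail, PySem.Set.len, PySem.Set.empty] at *
  rw [hadj, hfin, hA, min_def]
  split_ifs <;> omega
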